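-- pv_equiv track=rewrite | github.com/margaretlyon21/Python-Programming | Lab 5 Dictionaries and Hashing.py | sumdicts
-- ===== SOURCE A (Python) =====
-- def sumdicts(lst):
--    """
--    Takes a list of dictionaries and returns a single dictionary which contains all the keys/value pairs found in list. And
--    if the same key appears in more than one dictionary, then the sum of values in list of dictionaries is returned
--    as the value mapped for that key
--    >>> d = sumdicts ([{'a': 5, 'b': 10, 'c': 90, 'd': 19}, {'a': 45, 'b': 78}, {'a': 90, 'c': 10}] )
--    >>> d == {'b': 88, 'c': 100, 'a': 140, 'd': 19}
--    True
--    """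
--    "*** YOUR CODE HERE ***"
--    result = {}
--    for elem in lst:
--        for key, value in elem.items():
--            if key in result:
--                result[key] += value
--            else:
--                result[key] = value
--    return result
-- ===== SOURCE B (Python) =====
-- def sumdicts(lst):
--     keys = []
--     for d in lst:
--         for k in d:
--             if k not in keys:
--                 keys.append(k)
--     return {k: sum(v for d in lst for k2, v in d.items() if k2 == k) for k in keys}
-- ===== Notes on version B (the rewrite author's own statement) =====
-- stated objective: alternative
-- what changed: Replaces A's single accumulating pass (update-or-insert into a result dict) with a two-phase key-driven approach: first collect the distinct keys in first-seen order, then build the result in one comprehension where each key's value is a fresh sum over all dictionaries.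
import Mathlib
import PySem

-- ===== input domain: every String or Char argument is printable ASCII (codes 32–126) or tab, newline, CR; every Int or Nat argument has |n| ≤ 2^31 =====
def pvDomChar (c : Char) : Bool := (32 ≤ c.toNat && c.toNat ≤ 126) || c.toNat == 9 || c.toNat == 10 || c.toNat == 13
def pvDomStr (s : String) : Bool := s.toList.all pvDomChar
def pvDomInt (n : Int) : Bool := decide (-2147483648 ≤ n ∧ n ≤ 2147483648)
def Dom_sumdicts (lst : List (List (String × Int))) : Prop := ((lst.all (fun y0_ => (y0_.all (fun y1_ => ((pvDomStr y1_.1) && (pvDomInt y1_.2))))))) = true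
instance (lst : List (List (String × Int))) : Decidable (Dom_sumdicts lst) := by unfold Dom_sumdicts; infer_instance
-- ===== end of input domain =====

-- B replaces A's single accumulating pass by a two-phase plan: collect distinct keys in
-- first-seen order, then compute each key's value as a fresh sum over all dictionaries
-- (objective: alternative decomposition, not speed).

-- ===== PORT A =====
-- A: one pass, update-or-insert into the accumulating result dict (assoc list, insertion order).
def sumdicts (lst : List (List (String × Int))) : List (String × Int) :=
  lst.foldl (fun result elem =>
    elem.foldl (fun result kv =>
      if result.any (fun p => p.1 == kv.1) then
        result.map (fun p => if p.1 == kv.1 then (p.1, p.2 + kv.2) else p)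
      else
        result ++ [kv]) result) []

-- ===== PORT B =====
-- B: first-seen-order distinct key list, then one summing rescan of lst per key.
def sumdicts_alt (lst : List (List (String × Int))) : List (String × Int) :=
  let keys : List String := lst.foldl (fun ks d =>
    d.foldl (fun ks kv => if ks.contains kv.1 then ks else ks ++ [kv.1]) ks) []
  keys.map (fun k =>
    (k, lst.foldl (fun s d => d.foldl (fun s kv => if kv.1 == k then s + kv.2 else s) s) 0))

-- ===== PRECONDITION & SPEC =====
def Spec_sumdicts (lst : List (List (String × Int))) (out : List (String × Int)) : Prop := out = sumdicts_alt lst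
instance (lst : List (List (String × Int))) (out : List (String × Int)) : Decidable (Spec_sumdicts lst out) := by unfold Spec_sumdicts; infer_instance

-- ===== CLAIM (what is proved, stated in full; the proofs are below) =====
def Claim_equal_sumdicts : Prop := ∀ (lst : List (List (String × Int))), Dom_sumdicts lst → Spec_sumdicts lst (sumdicts lst)

-- ===== LEMMAS AND PROOFS =====

-- A's accumulator step, B's key step, B's per-key sum step (proof-side names for the ports' lambdas)
def pvStepA (result : List (String × Int)) (kv : String × Int) : List (String × Int) :=
  if result.any (fun p => p.1 == kv.1) then
    result.map (fun p => if p.1 == kv.1 then (p.1, p.2 + kv.2) else p)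
  else
    result ++ [kv]

def pvKeyStep (ks : List String) (kv : String × Int) : List String :=
  if ks.contains kv.1 then ks else ks ++ [kv.1]

def pvSumStep (k : String) (s : Int) (kv : String × Int) : Int :=
  if kv.1 == k then s + kv.2 else s

-- fold over a list of lists = fold over the flattening
theorem pv_foldl_foldl {α β : Type} (f : β → α → β) (L : List (List α)) (b : β) :
    L.foldl (fun b l => l.foldl f b) b = (L.flatMap id).foldl f b := by
  induction L generalizing b with
  | nil => rfl
  | cons h t ih => simp [List.flatMap_cons, List.foldl_append, ih]

theorem pv_mem_keys (ps : List (String × Int)) (acc : List String) (k : String) :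
    k ∈ ps.foldl pvKeyStep acc ↔ k ∈ acc ∨ k ∈ ps.map Prod.fst := by
  induction ps generalizing acc with
  | nil => simp
  | cons kv t ih =>
    simp only [List.foldl_cons, ih, pvKeyStep, List.map_cons, List.mem_cons]
    split_ifs with h
    · have h' : kv.1 ∈ acc := by simpa using h
      constructor
      · rintro (ha | ht)
        · exact Or.inl ha
        · exact Or.inr (Or.inr ht)
      · rintro (ha | he | ht)
        · exact Or.inl ha
        · exact Or.inl (he ▸ h')
        · exact Or.inr ht
    · simp [List.mem_append, or_assoc]

theorem pv_sum_absent (ps : List (String × Int)) (k : String) :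
    k ∉ ps.map Prod.fst → ∀ s : Int, ps.foldl (pvSumStep k) s = s := by
  induction ps with
  | nil => intro _ _; rfl
  | cons kv t ih =>
    intro h s
    simp only [List.map_cons, List.mem_cons, not_or] at h
    simp only [List.foldl_cons, pvSumStep]
    rw [if_neg (by simp only [beq_iff_eq]; exact fun e => h.1 e.symm)]
    exact ih h.2 s

-- main invariant: A's fold over the flattened pairs is B's key-list mapped to B's sums
theorem pv_main (ps : List (String × Int)) :
    ps.foldl pvStepA [] =
      (ps.foldl pvKeyStep []).map (fun k => (k, ps.foldl (pvSumStep k) 0)) := by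
  induction ps using List.reverseRecOn with
  | nil => rfl
  | append_singleton qs kv ih =>
    rw [List.foldl_append, List.foldl_append, ih]
    simp only [List.foldl_cons, List.foldl_nil]
    by_cases hmem : kv.1 ∈ qs.foldl pvKeyStep []
    · -- key already seen: A updates in place, key list unchanged, sums change only at kv.1
      have hany : (((qs.foldl pvKeyStep []).map
          (fun k => (k, qs.foldl (pvSumStep k) 0))).any (fun p => p.1 == kv.1)) = true := by
        simp only [List.any_map, List.any_eq_true]
        exact ⟨kv.1, hmem, by simp⟩
      rw [pvStepA, if_pos hany, pvKeyStep, if_pos (by simpa using hmem)]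
      rw [List.map_map]
      apply List.map_congr_left
      intro k _
      rw [List.foldl_append]
      simp only [Function.comp, List.foldl_cons, List.foldl_nil, pvSumStep]
      by_cases hk : k = kv.1
      · simp [hk]
      · rw [if_neg (by simpa using hk),
            if_neg (by simp only [beq_iff_eq]; exact fun e => hk e.symm)]
    · -- new key: A appends, key list grows, old sums unchanged, new sum starts from 0
      have hany : (((qs.foldl pvKeyStep []).map
          (fun k => (k, qs.foldl (pvSumStep k) 0))).any (fun p => p.1 == kv.1)) = false := by
        simp only [List.any_map, List.any_eq_false]
        intro k hk
        simp only [Function.comp, beq_iff_eq]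
        exact fun e => hmem (e ▸ hk)
      rw [pvStepA, if_neg (by simp [hany]), pvKeyStep, if_neg (by simpa using hmem)]
      rw [List.map_append]
      congr 1
      · apply List.map_congr_left
        intro k hk
        rw [List.foldl_append]
        simp only [List.foldl_cons, List.foldl_nil, pvSumStep]
        rw [if_neg (by simp only [beq_iff_eq]; intro e; exact hmem (e ▸ hk))]
      · have h0 : qs.foldl (pvSumStep kv.1) 0 = 0 :=
          pv_sum_absent qs kv.1 (fun habs => hmem ((pv_mem_keys qs [] kv.1).2 (Or.inr habs))) 0
        simp [List.foldl_append, h0, pvSumStep]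

theorem pv_ports_eq (lst : List (List (String × Int))) :
    sumdicts lst = sumdicts_alt lst := by
  have e1 : sumdicts lst = lst.foldl (fun b d => d.foldl pvStepA b) [] := rfl
  have e2 : sumdicts_alt lst = (lst.foldl (fun b d => d.foldl pvKeyStep b) []).map
      (fun k => (k, lst.foldl (fun s d => d.foldl (pvSumStep k) s) 0)) := rfl
  rw [e1, e2, pv_foldl_foldl, pv_foldl_foldl, pv_main]
  apply List.map_congr_left
  intro k _
  rw [pv_foldl_foldl (pvSumStep k) lst 0]

-- ===== VERDICT (by name: the statement is the Claim_ definition above) =====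
theorem sumdicts_spec : Claim_equal_sumdicts := by
  intro lst _
  unfold Spec_sumdicts
  exact pv_ports_eq lst
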